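-- pv_equiv track=rewrite | github.com/sunil19m/intel_coding | command_parser.py | fetch_commands_from_text
-- ===== SOURCE A (Python) =====
-- COMMAND_LIST_FORMAT = "[COMMAND LIST]"
--
-- VALID_COMMANDS_FROMAT = "[VALID COMMANDS]"
--
-- def fetch_commands_from_text(file_data):
--     """
--     Takes the raw data from the text file and parses
--     and puts the data to appropriate variables based on the section.
--
--     The commands to execute are the sets (Removing duplication).
--     The commands to verify are made as dictionary.
--         @param file_data: raw file information
--         @return command_list => Containing the commands to execute
--                 valid_command_dict => Containing the verification commands.
--     """
--     command_list = list()
--     valid_command_dict = dict()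
--     is_valid_command_section = False
--     for line in file_data:
--         if not is_valid_command_section:
--             if line.strip() == COMMAND_LIST_FORMAT:
--                 continue
--             if line.strip() == VALID_COMMANDS_FROMAT:
--                 is_valid_command_section = True
--                 continue
--             command_list.append(line.strip())
--         else:
--             valid_command_dict[line.strip()] = True
--     return (command_list, valid_command_dict)
-- ===== SOURCE B (Python) =====
-- COMMAND_LIST_FORMAT = "[COMMAND LIST]"
--
-- VALID_COMMANDS_FROMAT = "[VALID COMMANDS]"
--
-- def fetch_commands_from_text(file_data):
--     lines = [line.strip() for line in file_data]
--     try: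
--         idx = lines.index(VALID_COMMANDS_FROMAT)
--     except ValueError:
--         idx = len(lines)
--     command_list = [s for s in lines[:idx] if s != COMMAND_LIST_FORMAT]
--     valid_command_dict = {s: True for s in lines[idx + 1:]}
--     return (command_list, valid_command_dict)
-- ===== Notes on version B (the rewrite author's own statement) =====
-- stated objective: simpler
-- what changed: Replaces the stateful single pass with a flag by: strip all lines once, locate the section boundary with list.index, then build the command list and the dict from the two slices with comprehensions.
import Mathlib
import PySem

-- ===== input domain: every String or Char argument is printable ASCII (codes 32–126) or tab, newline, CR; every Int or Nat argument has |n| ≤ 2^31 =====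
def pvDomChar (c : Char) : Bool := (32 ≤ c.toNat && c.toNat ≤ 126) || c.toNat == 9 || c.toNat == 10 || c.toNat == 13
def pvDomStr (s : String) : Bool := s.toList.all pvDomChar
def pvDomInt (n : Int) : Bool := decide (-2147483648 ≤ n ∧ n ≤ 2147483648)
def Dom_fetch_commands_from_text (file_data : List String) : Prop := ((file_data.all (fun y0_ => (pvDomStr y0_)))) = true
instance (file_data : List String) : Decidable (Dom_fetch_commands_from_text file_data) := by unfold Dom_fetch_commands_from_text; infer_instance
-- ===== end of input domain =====

-- B replaces A's single stateful flag-driven pass by: strip all lines once, find the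
-- section boundary with list.index, then build the two results from the two slices
-- (a filter and a dict comprehension). Objective: simpler decomposition, same cost.

def pvCOMMAND_LIST_FORMAT : String := "[COMMAND LIST]"
def pvVALID_COMMANDS_FROMAT : String := "[VALID COMMANDS]"

-- ===== PORT A =====
-- A's for-loop over file_data with state (command_list, valid_command_dict, flag)
def fcLoopA : List String → List String → PySem.Dict String Bool → Bool →
    List String × PySem.Dict String Bool
  | [], cl, d, _ => (cl, d)
  | line :: rest, cl, d, flag =>
    if flag = false then
      if PySem.Str.strip line = pvCOMMAND_LIST_FORMAT then fcLoopA rest cl d false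
      else if PySem.Str.strip line = pvVALID_COMMANDS_FROMAT then fcLoopA rest cl d true
      else fcLoopA rest (cl ++ [PySem.Str.strip line]) d false
    else fcLoopA rest cl (d.insert (PySem.Str.strip line) true) flag

def fetch_commands_from_text (file_data : List String) : List String × (List (String × Bool)) :=
  let r := fcLoopA file_data [] PySem.Dict.empty false
  (r.1, r.2.items)

-- ===== PORT B =====
-- B's core on the stripped lines: boundary index, then slice-based constructions
def fcAltCore (lines : List String) : List String × PySem.Dict String Bool :=
  let idx := (PySem.List.index? lines pvVALID_COMMANDS_FROMAT).getD lines.length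
  ((lines.take idx).filter (fun s => s != pvCOMMAND_LIST_FORMAT),
   (lines.drop (idx + 1)).foldl (fun d s => d.insert s true) PySem.Dict.empty)

def fetch_commands_from_text_alt (file_data : List String) : List String × (List (String × Bool)) :=
  let r := fcAltCore (file_data.map PySem.Str.strip)
  (r.1, r.2.items)

-- ===== PRECONDITION & SPEC =====
def Spec_fetch_commands_from_text (file_data : List String) (out : List String × (List (String × Bool))) : Prop := out = fetch_commands_from_text_alt file_data
instance (file_data : List String) (out : List String × (List (String × Bool))) : Decidable (Spec_fetch_commands_from_text file_data out) := by unfold Spec_fetch_commands_from_text; infer_instance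

-- ===== CLAIM (what is proved, stated in full; the proofs are below) =====
def Claim_equal_fetch_commands_from_text : Prop := ∀ (file_data : List String), Dom_fetch_commands_from_text file_data → Spec_fetch_commands_from_text file_data (fetch_commands_from_text file_data)

-- ===== LEMMAS AND PROOFS =====

-- once the flag is set, the loop only builds the dict
theorem fcLoopA_true (xs : List String) : ∀ (cl : List String) (d : PySem.Dict String Bool),
    fcLoopA xs cl d true = (cl, (xs.map PySem.Str.strip).foldl (fun d s => d.insert s true) d) := by
  induction xs with
  | nil => intro cl d; simp [fcLoopA]
  | cons x rest ih => intro cl d; simp [fcLoopA, ih]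

theorem fcAltCore_cons_valid (rest : List String) :
    fcAltCore (pvVALID_COMMANDS_FROMAT :: rest) =
      ([], rest.foldl (fun d s => d.insert s true) PySem.Dict.empty) := by
  unfold fcAltCore
  rw [PySem.List.index?_cons_self]
  simp

theorem fcAltCore_cons (s : String) (rest : List String) (h : s ≠ pvVALID_COMMANDS_FROMAT) :
    fcAltCore (s :: rest) =
      ((if s = pvCOMMAND_LIST_FORMAT then (fcAltCore rest).1 else s :: (fcAltCore rest).1),
       (fcAltCore rest).2) := by
  have hidx := PySem.List.index?_cons_of_ne (x := s) (xs := rest) (v := pvVALID_COMMANDS_FROMAT) h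
  unfold fcAltCore
  rw [hidx]
  cases hrec : PySem.List.index? rest pvVALID_COMMANDS_FROMAT with
  | none =>
      by_cases hc : s = pvCOMMAND_LIST_FORMAT <;> simp [hc]
  | some k =>
      by_cases hc : s = pvCOMMAND_LIST_FORMAT <;> simp [hc]

theorem fcLoopA_false (xs : List String) : ∀ (cl : List String),
    fcLoopA xs cl PySem.Dict.empty false =
      (cl ++ (fcAltCore (xs.map PySem.Str.strip)).1, (fcAltCore (xs.map PySem.Str.strip)).2) := by
  induction xs with
  | nil => intro cl; simp [fcLoopA, fcAltCore]
  | cons x rest ih =>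
    intro cl
    by_cases hc : PySem.Str.strip x = pvCOMMAND_LIST_FORMAT
    · have hv : PySem.Str.strip x ≠ pvVALID_COMMANDS_FROMAT := by rw [hc]; decide
      have h1 : fcLoopA (x :: rest) cl PySem.Dict.empty false =
          fcLoopA rest cl PySem.Dict.empty false := by simp [fcLoopA, hc]
      rw [h1, ih, List.map_cons, fcAltCore_cons _ _ hv, if_pos hc]
    · by_cases hv : PySem.Str.strip x = pvVALID_COMMANDS_FROMAT
      · have h1 : fcLoopA (x :: rest) cl PySem.Dict.empty false =
            fcLoopA rest cl PySem.Dict.empty true := by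
          have hvc : pvVALID_COMMANDS_FROMAT ≠ pvCOMMAND_LIST_FORMAT := by decide
          simp [fcLoopA, hv, hvc]
        rw [h1, fcLoopA_true, List.map_cons, hv, fcAltCore_cons_valid]
        simp
      · have h1 : fcLoopA (x :: rest) cl PySem.Dict.empty false =
            fcLoopA rest (cl ++ [PySem.Str.strip x]) PySem.Dict.empty false := by
          simp [fcLoopA, hc, hv]
        rw [h1, ih, List.map_cons, fcAltCore_cons _ _ hv, if_neg hc]
        simp

-- ===== VERDICT (by name: the statement is the Claim_ definition above) =====
theorem fetch_commands_from_text_spec : Claim_equal_fetch_commands_from_text := by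
  intro file_data _
  unfold Spec_fetch_commands_from_text fetch_commands_from_text fetch_commands_from_text_alt
  rw [fcLoopA_false file_data []]
  simp
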